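-- pv_equiv track=rewrite | github.com/koii-network/prometheus-beta | src/multi_array_transformer.py | transform_multi_array
-- ===== SOURCE A (Python) =====
-- def transform_multi_array(input_array):
--     """
--     Transform a multi-dimensional array by:
--     1. Removing empty sub-arrays
--     2. Reversing the order of elements in each sub-array
--     3. Flattening the array
--     4. Removing duplicates while maintaining original order
--
--     Args:
--         input_array (list): A multi-dimensional list to transform
--
--     Returns:
--         list: Transformed and cleaned list
--     """
--     # Remove empty sub-arrays
--     non_empty_arrays = [arr for arr in input_array if arr]
--
--     # Reverse elements in each sub-array
--     reversed_arrays = [arr[::-1] for arr in non_empty_arrays]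
--
--     # Flatten the array
--     flattened_array = [item for sublist in reversed_arrays for item in sublist]
--
--     # Remove duplicates while maintaining order
--     seen = set()
--     result = []
--     for item in flattened_array:
--         if item not in seen:
--             seen.add(item)
--             result.append(item)
--
--     return result
-- ===== SOURCE B (Python) =====
-- def transform_multi_array(input_array):
--     """Positional dedup: flatten the reversed sublists once, build a dict
--     mapping each value to the index of its first occurrence, then keep
--     exactly the elements standing at their value's first index.
--     No incremental seen-set/result state."""
--     flat = [x for sub in input_array for x in sub[::-1]]
--     first = {}
--     for i, x in enumerate(flat):
--         first.setdefault(x, i)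
--     return [x for i, x in enumerate(flat) if first[x] == i]
-- ===== Notes on version B (the rewrite author's own statement) =====
-- stated objective: alternative
-- what changed: Replaces A's staged filter/reverse/flatten passes plus stateful seen-set accumulation loop by a stateless positional characterization: flatten the reversed sublists once, build a first-occurrence-index dict in one pass, and keep each element iff its index equals its value's first index.
import Mathlib
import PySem

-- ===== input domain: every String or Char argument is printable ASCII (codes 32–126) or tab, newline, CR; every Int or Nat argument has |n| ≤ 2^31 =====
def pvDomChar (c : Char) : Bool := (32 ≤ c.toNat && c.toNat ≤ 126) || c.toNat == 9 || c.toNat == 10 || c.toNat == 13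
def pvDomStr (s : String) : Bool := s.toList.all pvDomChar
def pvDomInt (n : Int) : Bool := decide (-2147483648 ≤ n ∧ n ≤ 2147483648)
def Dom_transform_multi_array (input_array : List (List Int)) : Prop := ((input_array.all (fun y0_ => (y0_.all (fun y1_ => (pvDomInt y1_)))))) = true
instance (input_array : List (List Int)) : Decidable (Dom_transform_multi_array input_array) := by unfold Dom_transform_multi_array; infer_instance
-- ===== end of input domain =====

-- B replaces A's staged passes + seen-set dedup loop by a stateless positional rule:
-- build a first-occurrence-index dict, keep flat[i] iff first[flat[i]] == i (objective: alternative; not faster).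
-- ===== PORT A =====
def transform_multi_array (input_array : List (List Int)) : List Int :=
  let non_empty_arrays := input_array.filter (fun arr => decide (arr ≠ []))   -- [arr for arr in input_array if arr]
  let reversed_arrays := non_empty_arrays.map (fun arr => arr.reverse)        -- arr[::-1]
  let flattened_array := reversed_arrays.flatMap (fun sublist => sublist)     -- flatten comprehension
  -- dedup loop: state (seen, result)
  (flattened_array.foldl
    (fun st item =>
      if PySem.Set.contains st.1 item then st
      else (PySem.Set.add st.1 item, st.2 ++ [item]))
    ((PySem.Set.empty : PySem.Set Int), ([] : List Int))).2

-- ===== PORT B =====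
def transform_multi_array_alt (input_array : List (List Int)) : List Int :=
  let flat := input_array.flatMap (fun sub => sub.reverse)   -- [x for sub in input_array for x in sub[::-1]]
  let first := (PySem.List.enumerate flat 0).foldl           -- for i, x in enumerate(flat): first.setdefault(x, i)
      (fun d p => PySem.Dict.setdefault d p.2 p.1) (PySem.Dict.empty : PySem.Dict Int Int)
  -- first[x] == i : every x of flat is a key of first, so first[x] never raises; exact as get? = some i
  ((PySem.List.enumerate flat 0).filter
      (fun p => decide (PySem.Dict.get? first p.2 = some p.1))).map (fun p => p.2)

-- ===== PRECONDITION & SPEC =====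
def Spec_transform_multi_array (input_array : List (List Int)) (out : List Int) : Prop := out = transform_multi_array_alt input_array
instance (input_array : List (List Int)) (out : List Int) : Decidable (Spec_transform_multi_array input_array out) := by unfold Spec_transform_multi_array; infer_instance

-- ===== CLAIM (what is proved, stated in full; the proofs are below) =====
def Claim_equal_transform_multi_array : Prop := ∀ (input_array : List (List Int)), Dom_transform_multi_array input_array → Spec_transform_multi_array input_array (transform_multi_array input_array)

-- ===== LEMMAS AND PROOFS =====

-- Reference dedup: first occurrences of l not already in seen.
def pvDedupF (seen : List Int) : List Int → List Int
  | [] => []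
  | x :: xs => if x ∈ seen then pvDedupF seen xs else x :: pvDedupF (x :: seen) xs

theorem pvDedupF_congr : ∀ (l s1 s2 : List Int), (∀ y, y ∈ s1 ↔ y ∈ s2) →
    pvDedupF s1 l = pvDedupF s2 l := by
  intro l
  induction l with
  | nil => intro _ _ _; rfl
  | cons x xs ih =>
    intro s1 s2 h
    by_cases hx : x ∈ s1
    · rw [pvDedupF, pvDedupF, if_pos hx, if_pos ((h x).mp hx)]
      exact ih s1 s2 h
    · have hx2 : x ∉ s2 := fun c => hx ((h x).mpr c)
      rw [pvDedupF, pvDedupF, if_neg hx, if_neg hx2]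
      exact congrArg (x :: ·) (ih (x :: s1) (x :: s2) (by intro y; simp [h y]))

-- A's fold with (seen-set, result) state computes pvDedupF (the seen set IS its element list).
theorem pvFoldA : ∀ (l : List Int) (S : PySem.Set Int) (r : List Int),
    (l.foldl (fun st item =>
        if PySem.Set.contains st.1 item then st
        else (PySem.Set.add st.1 item, st.2 ++ [item])) (S, r)).2
      = r ++ pvDedupF S l := by
  intro l
  induction l with
  | nil => intro S r; simp [pvDedupF]
  | cons x xs ih =>
    intro S r
    by_cases hx : x ∈ S
    · have hstep : (if PySem.Set.contains (S, r).1 x then (S, r)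
          else (PySem.Set.add (S, r).1 x, (S, r).2 ++ [x])) = (S, r) := by
        simp [PySem.Set.contains, hx]
      rw [List.foldl_cons, hstep, ih, pvDedupF, if_pos hx]
    · have hstep : (if PySem.Set.contains (S, r).1 x then (S, r)
          else (PySem.Set.add (S, r).1 x, (S, r).2 ++ [x])) = (S ++ [x], r ++ [x]) := by
        simp [PySem.Set.contains, PySem.Set.add, hx]
      rw [List.foldl_cons, hstep, ih, pvDedupF, if_neg hx,
        pvDedupF_congr xs (S ++ [x]) (x :: S) (by intro y; simp [List.mem_append, or_comm])]
      simp

-- Filtering out empty sublists does not change the flattening of the reversals.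
theorem pvFlatFilter : ∀ (xs : List (List Int)),
    ((xs.filter (fun a => decide (a ≠ []))).map (fun a => a.reverse)).flatMap (fun s => s)
      = xs.flatMap (fun sub => sub.reverse) := by
  intro xs
  induction xs with
  | nil => rfl
  | cons x xs ih =>
    by_cases hx : x = []
    · subst hx; simpa using ih
    · rw [List.filter_cons_of_pos (by simpa using hx), List.map_cons, List.flatMap_cons,
        List.flatMap_cons, ih]

-- A key already present keeps its value through the whole setdefault fold.
theorem pvFirstSome : ∀ (l : List Int) (s : Int) (d : PySem.Dict Int Int) (x : Int) (v : Int),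
    PySem.Dict.get? d x = some v →
    PySem.Dict.get? ((PySem.List.enumerate l s).foldl
        (fun d p => PySem.Dict.setdefault d p.2 p.1) d) x = some v := by
  intro l
  induction l with
  | nil => intro s d x v hd; simpa using hd
  | cons y ys ih =>
    intro s d x v hd
    rw [PySem.List.enumerate_cons, List.foldl_cons]
    refine ih (s + 1) _ x v ?_
    by_cases hxy : x = y
    · subst hxy; rw [PySem.Dict.get?_setdefault_self, hd]; rfl
    · rw [PySem.Dict.get?_setdefault_of_ne _ _ hxy, hd]

-- The setdefault fold maps x (absent from d) to s + (index of x's first occurrence in l).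
theorem pvFirstGet : ∀ (l : List Int) (s : Int) (d : PySem.Dict Int Int) (x : Int),
    PySem.Dict.get? d x = none →
    PySem.Dict.get? ((PySem.List.enumerate l s).foldl
        (fun d p => PySem.Dict.setdefault d p.2 p.1) d) x
      = (PySem.List.index? l x).map (fun k => s + Int.ofNat k) := by
  intro l
  induction l with
  | nil => intro s d x hd; simpa [PySem.List.index?_eq_idxOf?] using hd
  | cons y ys ih =>
    intro s d x hd
    rw [PySem.List.enumerate_cons, List.foldl_cons]
    by_cases hxy : x = y
    · subst hxy
      have h1 : PySem.Dict.get? (PySem.Dict.setdefault d x s) x = some s := by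
        rw [PySem.Dict.get?_setdefault_self, hd]; rfl
      rw [pvFirstSome ys (s + 1) _ x s h1, PySem.List.index?_cons_self]
      simp
    · have h1 : PySem.Dict.get? (PySem.Dict.setdefault d y s) x = none := by
        rw [PySem.Dict.get?_setdefault_of_ne _ _ hxy, hd]
      rw [ih (s + 1) _ x h1, PySem.List.index?_cons_of_ne ys (Ne.symm hxy)]
      cases PySem.List.index? ys x with
      | none => rfl
      | some k => simp; ring

-- With flat = pre ++ x :: xs, x's first index in flat is |pre| exactly when x ∉ pre.
theorem pvIndexPre (pre xs : List Int) (x : Int) :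
    PySem.List.index? (pre ++ x :: xs) x = some pre.length ↔ x ∉ pre := by
  constructor
  · intro h
    obtain ⟨p, s, hsplit, hlen, hnx⟩ := (PySem.List.index?_eq_some_iff _ _ _).mp h
    have hpp : pre = p := (List.append_inj hsplit hlen.symm).1
    rw [hpp]; exact hnx
  · intro hx
    exact (PySem.List.index?_eq_some_iff _ _ _).mpr ⟨pre, xs, rfl, rfl, hx⟩

-- B's positional filter, started after a processed prefix `pre`, computes pvDedupF pre,
-- given that `fir` maps every value to its first index in flat.
theorem pvFilterB (flat : List Int) (fir : PySem.Dict Int Int)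
    (hfir : ∀ x, PySem.Dict.get? fir x = (PySem.List.index? flat x).map (fun k => Int.ofNat k)) :
    ∀ (l pre : List Int), flat = pre ++ l →
    ((PySem.List.enumerate l (pre.length : Int)).filter
        (fun p => decide (PySem.Dict.get? fir p.2 = some p.1))).map (fun p => p.2)
      = pvDedupF pre l := by
  intro l
  induction l with
  | nil => intro pre _; rfl
  | cons x xs ih =>
    intro pre hflat
    rw [PySem.List.enumerate_cons, List.filter_cons]
    have hcond : (PySem.Dict.get? fir x = some (pre.length : Int)) ↔ x ∉ pre := by
      rw [hfir x, hflat]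
      constructor
      · intro h
        obtain ⟨k, hk, hcast⟩ := Option.map_eq_some_iff.mp h
        have hk' : k = pre.length := by
          rw [Int.ofNat_eq_natCast] at hcast
          exact_mod_cast hcast
        exact (pvIndexPre pre xs x).mp (hk' ▸ hk)
      · intro hx
        rw [(pvIndexPre pre xs x).mpr hx]
        rfl
    have hlen : ((pre.length : Int) + 1) = (((pre ++ [x]).length : Nat) : Int) := by simp
    have hih := ih (pre ++ [x]) (by simp [hflat])
    by_cases hx : x ∈ pre
    · rw [if_neg (by simpa using fun h => (hcond.mp h) hx), hlen, hih, pvDedupF, if_pos hx]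
      exact pvDedupF_congr xs (pre ++ [x]) pre
        (by intro y
            simp only [List.mem_append, List.mem_singleton]
            constructor
            · rintro (h | rfl)
              · exact h
              · exact hx
            · exact Or.inl)
    · rw [if_pos (by simpa using hcond.mpr hx), List.map_cons, hlen, hih, pvDedupF, if_neg hx]
      exact congrArg (x :: ·)
        (pvDedupF_congr xs (pre ++ [x]) (x :: pre) (by intro y; simp [List.mem_append, or_comm]))

-- ===== VERDICT (by name: the statement is the Claim_ definition above) =====
theorem transform_multi_array_spec : Claim_equal_transform_multi_array := by
  intro input_array _
  unfold Spec_transform_multi_array transform_multi_array transform_multi_array_alt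
  rw [pvFoldA, pvFlatFilter]
  have hfir : ∀ x, PySem.Dict.get?
      ((PySem.List.enumerate (input_array.flatMap (fun sub => sub.reverse)) 0).foldl
        (fun d p => PySem.Dict.setdefault d p.2 p.1) (PySem.Dict.empty : PySem.Dict Int Int)) x
      = (PySem.List.index? (input_array.flatMap (fun sub => sub.reverse)) x).map (fun k => Int.ofNat k) := by
    intro x
    rw [pvFirstGet _ 0 _ x (by simp [PySem.Dict.get?_empty])]
    cases PySem.List.index? (input_array.flatMap (fun sub => sub.reverse)) x with
    | none => rfl
    | some k => simp
  have h := pvFilterB (input_array.flatMap (fun sub => sub.reverse)) _ hfir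
      (input_array.flatMap (fun sub => sub.reverse)) [] rfl
  simp only [List.length_nil, Nat.cast_zero] at h
  rw [h]
  rfl
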